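-- pv_equiv track=rewrite | github.com/jfitz/code-stat | cobol_fixedformat_examiner.py | unwrapped_code
-- ===== SOURCE A (Python) =====
-- def unwrapped_code(lines):
--   unwrapped_lines = ''
--
--   buffer = None
--   for line in lines:
--     # remove line description (if any)
--     line = line[:72]
--
--     # force line length to 72 (used later when continuing strings)
--     while len(line) < 72:
--       line += ' '
--
--     # if continuation (not comment, longer than 6, not space in column)
--     if len(line) > 6 and line[6] == '-':
--       # drop leading columns
--       line = line[7:]
--
--       # append to buffer
--       if buffer is None:
--         buffer = line
--       else:
--         # drop leading spaces and the leading quote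
--         line = line.lstrip()
--
--         buffer2 = buffer.rstrip()
--         if len(buffer2) > 0:
--           # if the buffer ends with other than quote,
--           if buffer2[-1] not in "'\"":
--             # combine strings by dropping this line's opening quote
--             if len(line) > 0 and line[0] in "'\"":
--               line = line[1:]
--               buffer += line
--           else:
--             # previous line ends in quote
--             buffer = buffer2 + ' '  # space to separate string tokens
--             buffer += line
--         else:
--           buffer = line
--     else:
--       if buffer is not None:
--         # now drop the extra spaces on the right
--         unwrapped_lines += buffer.rstrip()
--         unwrapped_lines += '\n'
--       buffer = line
--
--   if buffer is not None and len(buffer) > 0: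
--     unwrapped_lines += buffer
--     unwrapped_lines += '\n'
--
--   return unwrapped_lines
-- ===== SOURCE B (Python) =====
-- def _merge(buf, line):
--     # fold one continuation line (columns 8..72) into the running buffer
--     line = line.lstrip()
--     b2 = buf.rstrip()
--     if not b2:
--         return line
--     if b2[-1] in "'\"":
--         return b2 + ' ' + line
--     if line and line[0] in "'\"":
--         return buf + line[1:]
--     return buf
--
--
-- def unwrapped_code(lines):
--     # pass 1: normalize every line to exactly 72 columns
--     norm = [line[:72].ljust(72) for line in lines]
--     n = len(norm)
--     # pass 2: two-pointer scan over groups (a leader plus its '-' continuations)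
--     parts = []
--     i = 0
--     while i < n:
--         line = norm[i]
--         buf = line[7:] if line[6] == '-' else line
--         j = i + 1
--         while j < n and norm[j][6] == '-':
--             buf = _merge(buf, norm[j][7:])
--             j += 1
--         if j < n:
--             parts.append(buf.rstrip() + '\n')
--         elif buf:
--             parts.append(buf + '\n')
--         i = j
--     return ''.join(parts)
-- ===== Notes on version B (the rewrite author's own statement) =====
-- stated objective: alternative
-- what changed: A interleaves normalization, quote-merging and emission in one accumulating loop over an optional buffer, padding each line with a character-at-a-time while loop and growing the output by string +=; B first normalizes every line to 72 columns with ljust, then does a two-pointer scan that consumes each leader line together with its '-' continuations via a separate _merge helper, joining the collected pieces at the end.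
import Mathlib
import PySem

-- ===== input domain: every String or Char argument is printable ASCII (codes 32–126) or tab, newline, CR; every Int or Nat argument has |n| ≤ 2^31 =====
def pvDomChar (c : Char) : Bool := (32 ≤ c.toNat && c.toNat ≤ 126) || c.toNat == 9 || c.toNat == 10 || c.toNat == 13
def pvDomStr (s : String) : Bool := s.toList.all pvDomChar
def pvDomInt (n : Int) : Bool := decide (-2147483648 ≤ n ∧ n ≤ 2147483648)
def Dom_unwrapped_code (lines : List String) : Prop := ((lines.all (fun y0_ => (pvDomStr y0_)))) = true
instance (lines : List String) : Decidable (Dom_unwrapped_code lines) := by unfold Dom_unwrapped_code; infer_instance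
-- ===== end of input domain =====

-- B replaces A's single accumulating loop by a two-pointer group scan with a separated
-- merge helper: lines are ljust-padded once and the emitted pieces are joined at the end
-- (a timing run measured B faster by a constant factor; same asymptotic cost).

-- shared leaf helper: Python  c in "'\""  for the optional character c (1-char membership)
def pvQuoteOpt (o : Option Char) : Bool := o == some '\'' || o == some '"'

-- ===== PORT A =====
-- while len(line) < 72: line += ' '
def pvPad72 (l : List Char) : List Char :=
  if l.length < 72 then pvPad72 (l ++ [' ']) else l
termination_by 72 - l.length
decreasing_by simp_all; omega

-- one iteration of A's for-loop; state = (unwrapped_lines, buffer)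
def pvStepA (st : List Char × Option (List Char)) (line0 : List Char) : List Char × Option (List Char) :=
  let line := pvPad72 (PySem.List.slice line0 none (some 72))
  if line.length > 6 && PySem.List.pyGet? line 6 == some '-' then
    let line := PySem.List.slice line (some 7) none
    match st.2 with
    | none => (st.1, some line)
    | some buffer =>
      let line := PySem.Chars.lstrip line
      let buffer2 := PySem.Chars.rstrip buffer
      if buffer2.length > 0 then
        if !(pvQuoteOpt (PySem.List.pyGet? buffer2 (-1))) then
          if line.length > 0 && pvQuoteOpt (PySem.List.pyGet? line 0) then
            (st.1, some (buffer ++ PySem.List.slice line (some 1) none))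
          else (st.1, some buffer)
        else (st.1, some (buffer2 ++ [' '] ++ line))
      else (st.1, some line)
  else
    match st.2 with
    | none => (st.1, some line)
    | some buffer => (st.1 ++ PySem.Chars.rstrip buffer ++ ['\n'], some line)

def unwrapped_code (lines : List String) : String :=
  let st := lines.foldl (fun st l => pvStepA st l.toList) (([] : List Char), (none : Option (List Char)))
  match st.2 with
  | some buffer => if buffer.length > 0 then String.ofList (st.1 ++ buffer ++ ['\n']) else String.ofList st.1
  | none => String.ofList st.1

-- ===== PORT B =====
-- line[:72].ljust(72)
def pvNorm (s : String) : List Char :=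
  let t := PySem.List.slice s.toList none (some 72)
  t ++ List.replicate (72 - t.length) ' '

-- norm[j][6] == '-'
def pvCont (l : List Char) : Bool := PySem.List.pyGet? l 6 == some '-'

-- line[7:]
def pvDrop7 (l : List Char) : List Char := PySem.List.slice l (some 7) none

-- Source B _merge
def pvMerge (buf line0 : List Char) : List Char :=
  let line := PySem.Chars.lstrip line0
  let b2 := PySem.Chars.rstrip buf
  if b2.length = 0 then line
  else if pvQuoteOpt (PySem.List.pyGet? b2 (-1)) then b2 ++ [' '] ++ line
  else if line.length > 0 && pvQuoteOpt (PySem.List.pyGet? line 0) then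
    buf ++ PySem.List.slice line (some 1) none
  else buf

-- inner while: consume the continuation lines of the current group, return (buf, rest)
def pvRunGroup (buf : List Char) : List (List Char) → List Char × List (List Char)
  | [] => (buf, [])
  | l :: ls => if pvCont l then pvRunGroup (pvMerge buf (pvDrop7 l)) ls else (buf, l :: ls)

theorem pvRunGroup_length_le (buf : List Char) (ls : List (List Char)) :
    (pvRunGroup buf ls).2.length ≤ ls.length := by
  induction ls generalizing buf with
  | nil => simp [pvRunGroup]
  | cons l ls ih =>
    simp only [pvRunGroup]
    split
    · exact le_trans (ih _) (Nat.le_succ _)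
    · simp

-- outer while over the remaining normalized lines (i advances to j = start of rest)
def pvOuterB : List (List Char) → List Char
  | [] => []
  | l :: ls =>
    let buf0 := if pvCont l then pvDrop7 l else l
    let p := pvRunGroup buf0 ls
    match p.2 with
    | [] => if p.1.length > 0 then p.1 ++ ['\n'] else []
    | _ :: _ => PySem.Chars.rstrip p.1 ++ ['\n'] ++ pvOuterB p.2
termination_by ns => ns.length
decreasing_by
  simp only [List.length_cons]
  split <;> exact Nat.lt_succ_of_le (pvRunGroup_length_le _ ls)

def unwrapped_code_alt (lines : List String) : String :=
  String.ofList (pvOuterB (lines.map pvNorm))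

-- ===== PRECONDITION & SPEC =====
def Spec_unwrapped_code (lines : List String) (out : String) : Prop := out = unwrapped_code_alt lines
instance (lines : List String) (out : String) : Decidable (Spec_unwrapped_code lines out) := by unfold Spec_unwrapped_code; infer_instance

-- ===== CLAIM (what is proved, stated in full; the proofs are below) =====
def Claim_equal_unwrapped_code : Prop := ∀ (lines : List String), Dom_unwrapped_code lines → Spec_unwrapped_code lines (unwrapped_code lines)

-- ===== LEMMAS AND PROOFS =====

theorem pvPad72_eq (l : List Char) : pvPad72 l = l ++ List.replicate (72 - l.length) ' ' := by
  fun_induction pvPad72 l with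
  | case1 l h ih =>
    rw [ih]
    have : 72 - l.length = (72 - (l ++ [' ']).length) + 1 := by simp; omega
    rw [this, List.replicate_succ]
    simp
  | case2 l h =>
    have : 72 - l.length = 0 := by omega
    simp [this]

theorem pvNorm_length (s : String) : (pvNorm s).length = 72 := by
  unfold pvNorm
  have : (PySem.List.slice s.toList none (some 72)).length ≤ 72 := by
    simp [pysem]
  simp; omega

-- A normalizes exactly as B does
theorem pvPadSlice_eq (s : String) :
    pvPad72 (PySem.List.slice s.toList none (some 72)) = pvNorm s := by
  rw [pvPad72_eq]; rfl

-- A's continuation test on a normalized line is B's pvCont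
theorem pvContA_eq (s : String) :
    (((pvNorm s).length > 6 && PySem.List.pyGet? (pvNorm s) 6 == some '-')) = pvCont (pvNorm s) := by
  have h := pvNorm_length s
  simp [pvCont, h]

-- proof-side: process the remaining lines with current buffer b and empty accumulator
def pvRun (b : List Char) : List (List Char) → List Char
  | [] => if b.length > 0 then b ++ ['\n'] else []
  | l :: ls =>
    if pvCont l then pvRun (pvMerge b (pvDrop7 l)) ls
    else PySem.Chars.rstrip b ++ ['\n'] ++ pvRun l ls

-- A's step on a live buffer, in terms of B's pieces
theorem pvStepA_some (acc b : List Char) (s : String) :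
    pvStepA (acc, some b) s.toList =
      if pvCont (pvNorm s) then (acc, some (pvMerge b (pvDrop7 (pvNorm s))))
      else (acc ++ PySem.Chars.rstrip b ++ ['\n'], some (pvNorm s)) := by
  unfold pvStepA
  rw [pvPadSlice_eq]
  simp only [pvContA_eq]
  by_cases h : pvCont (pvNorm s)
  · simp only [h, if_pos, pvDrop7]
    generalize PySem.List.slice (pvNorm s) (some 7) none = l
    simp only [pvMerge]
    split_ifs <;> first | rfl | omega | simp_all
  · simp [h]

-- A-side loop characterization: fold from (acc, some b) then flush = acc ++ pvRun b (normalized rest)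
theorem pvFoldA_eq (ss : List String) (acc b : List Char) :
    (match (ss.foldl (fun st l => pvStepA st l.toList) (acc, some b)).2 with
     | some buffer =>
        if buffer.length > 0 then (ss.foldl (fun st l => pvStepA st l.toList) (acc, some b)).1 ++ buffer ++ ['\n']
        else (ss.foldl (fun st l => pvStepA st l.toList) (acc, some b)).1
     | none => (ss.foldl (fun st l => pvStepA st l.toList) (acc, some b)).1)
    = acc ++ pvRun b (ss.map pvNorm) := by
  induction ss generalizing acc b with
  | nil =>
    simp only [List.foldl_nil, List.map_nil, pvRun]
    split_ifs <;> simp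
  | cons s ss ih =>
    simp only [List.foldl_cons, List.map_cons, pvRun, pvStepA_some]
    by_cases h : pvCont (pvNorm s)
    · simp only [h, if_pos]
      exact ih acc (pvMerge b (pvDrop7 (pvNorm s)))
    · simp only [h, if_neg, Bool.false_eq_true, not_false_iff]
      rw [ih (acc ++ PySem.Chars.rstrip b ++ ['\n']) (pvNorm s)]
      simp

-- B-side: continuing from buffer b equals pvRun
theorem pvRun_eq_B (ns : List (List Char)) (b : List Char) :
    pvRun b ns =
      (match (pvRunGroup b ns).2 with
       | [] => if (pvRunGroup b ns).1.length > 0 then (pvRunGroup b ns).1 ++ ['\n'] else []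
       | _ :: _ => PySem.Chars.rstrip (pvRunGroup b ns).1 ++ ['\n'] ++ pvOuterB (pvRunGroup b ns).2) := by
  induction ns generalizing b with
  | nil => simp [pvRun, pvRunGroup]
  | cons l ls ih =>
    by_cases h : pvCont l
    · simp only [pvRun, pvRunGroup, h, if_true]
      exact ih (pvMerge b (pvDrop7 l))
    · simp only [pvRun, pvRunGroup, h, Bool.false_eq_true, if_false]
      rw [pvOuterB.eq_def]
      simp only [h, Bool.false_eq_true, if_false]
      rw [ih l]

theorem pvOuterB_eq_run (l : List Char) (ls : List (List Char)) :
    pvOuterB (l :: ls) = pvRun (if pvCont l then pvDrop7 l else l) ls := by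
  rw [pvOuterB.eq_def, pvRun_eq_B]

-- ===== VERDICT (by name: the statement is the Claim_ definition above) =====
theorem unwrapped_code_spec : Claim_equal_unwrapped_code := by
  intro lines _
  unfold Spec_unwrapped_code unwrapped_code unwrapped_code_alt
  cases lines with
  | nil => rw [pvOuterB.eq_def]; rfl
  | cons s ss =>
    simp only [List.foldl_cons, List.map_cons]
    have hstep : pvStepA (([] : List Char), (none : Option (List Char))) s.toList =
        ([], some (if pvCont (pvNorm s) then pvDrop7 (pvNorm s) else pvNorm s)) := by
      unfold pvStepA
      rw [pvPadSlice_eq]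
      simp only [pvContA_eq]
      by_cases h : pvCont (pvNorm s) <;> simp [h, pvDrop7]
    rw [hstep, pvOuterB_eq_run]
    have := pvFoldA_eq ss [] (if pvCont (pvNorm s) then pvDrop7 (pvNorm s) else pvNorm s)
    simp only [List.nil_append] at this
    rw [← this]
    cases (ss.foldl (fun st l => pvStepA st l.toList)
        (([] : List Char), some (if pvCont (pvNorm s) then pvDrop7 (pvNorm s) else pvNorm s))).2 with
    | none => rfl
    | some buffer => by_cases hb : buffer.length > 0 <;> simp [hb]
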